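-- pv_equiv track=rewrite | github.com/Leon-SPI/Analysis-of-Lithium-Ion-Battery-Voltage-Data | Final Project/FinalQuestion1.py | reverse_cycle_index_start_finish
-- ===== SOURCE A (Python) =====
-- def reverse_cycle_index_start_finish(file_data):
--     discharge_start_last = -1
--     discharge_end_last = -1
--     for i in range(len(file_data) - 1, -1, -1):  # Traverse backward
--         if file_data[i] == -1:
--             discharge_end_last = i
--             break
--
--     for i in range(discharge_end_last, -1, -1):  # Find the start of the discharge
--         if file_data[i] != -1:
--             discharge_start_last = i + 1 + 4
--             break
--
--     if discharge_start_last == -1:  # Handle edge case where the discharge starts from index 0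
--         discharge_start_last = 0
--     return discharge_start_last, discharge_end_last
-- ===== SOURCE B (Python) =====
-- def reverse_cycle_index_start_finish(file_data):
--     end_last = -1
--     block_start = -1
--     prev = None
--     for i, v in enumerate(file_data):
--         if v == -1:
--             end_last = i
--             if prev != -1:
--                 block_start = i
--         prev = v
--     start = block_start + 4 if block_start > 0 else 0
--     return start, end_last
-- ===== Notes on version B (the rewrite author's own statement) =====
-- stated objective: alternative
-- what changed: Replaced A's two backward index scans with breaks (find last -1, then scan back past the -1 run) by a single forward pass that tracks the last -1 index and the start of its final run via the previous element, with no indexed re-scanning.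
import Mathlib
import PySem

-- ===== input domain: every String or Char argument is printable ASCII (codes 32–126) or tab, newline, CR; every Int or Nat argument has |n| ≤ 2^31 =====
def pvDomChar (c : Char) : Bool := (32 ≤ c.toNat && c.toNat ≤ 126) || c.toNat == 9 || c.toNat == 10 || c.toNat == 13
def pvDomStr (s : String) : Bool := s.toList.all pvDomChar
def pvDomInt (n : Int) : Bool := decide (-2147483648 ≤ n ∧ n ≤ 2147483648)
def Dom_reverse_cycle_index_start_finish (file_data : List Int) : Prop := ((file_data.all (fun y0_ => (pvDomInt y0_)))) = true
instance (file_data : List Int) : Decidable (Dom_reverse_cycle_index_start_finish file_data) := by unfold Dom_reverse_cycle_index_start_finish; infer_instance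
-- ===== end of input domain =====

-- B replaces A's two backward break-scans by one forward pass over the list (alternative decomposition, same O(n) cost).

-- ===== PORT A =====
-- first loop of A: for i in range(len-1, -1, -1): if file_data[i] == -1: end = i; break
-- (indices produced by the loop are always in range, so xs[i] is xs.getD i 0 — exact here)
def pvFindEnd (xs : List Int) : Nat → Int
  | 0 => -1
  | k + 1 => if xs.getD k 0 = -1 then (k : Int) else pvFindEnd xs k

-- second loop of A: for i in range(end, -1, -1): if file_data[i] != -1: start = i + 1 + 4; break
def pvFindStart (xs : List Int) : Nat → Int
  | 0 => -1
  | k + 1 => if xs.getD k 0 ≠ -1 then (k : Int) + 1 + 4 else pvFindStart xs k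

def reverse_cycle_index_start_finish (file_data : List Int) : Int × Int :=
  let dischargeEnd := pvFindEnd file_data file_data.length
  let dischargeStart := pvFindStart file_data (dischargeEnd + 1).toNat
  (if dischargeStart = -1 then 0 else dischargeStart, dischargeEnd)

-- ===== PORT B =====
-- state: (end_last, block_start, prev); one step of B's forward loop body
def pvBStep (st : Int × Int × Option Int) (iv : Int × Int) : Int × Int × Option Int :=
  match st, iv with
  | (e, bs, prev), (i, v) =>
    if v = -1 then (i, if prev ≠ some (-1) then i else bs, some v)
    else (e, bs, some v)

def reverse_cycle_index_start_finish_alt (file_data : List Int) : Int × Int :=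
  let st := (PySem.List.enumerate file_data).foldl pvBStep (-1, -1, none)
  (if st.2.1 > 0 then st.2.1 + 4 else 0, st.1)

-- ===== PRECONDITION & SPEC =====
def Spec_reverse_cycle_index_start_finish (file_data : List Int) (out : Int × Int) : Prop := out = reverse_cycle_index_start_finish_alt file_data
instance (file_data : List Int) (out : Int × Int) : Decidable (Spec_reverse_cycle_index_start_finish file_data out) := by unfold Spec_reverse_cycle_index_start_finish; infer_instance

-- ===== CLAIM (what is proved, stated in full; the proofs are below) =====
def Claim_equal_reverse_cycle_index_start_finish : Prop := ∀ (file_data : List Int), Dom_reverse_cycle_index_start_finish file_data → Spec_reverse_cycle_index_start_finish file_data (reverse_cycle_index_start_finish file_data)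

-- ===== LEMMAS AND PROOFS =====

def pvState (xs : List Int) : Int × Int × Option Int :=
  (PySem.List.enumerate xs).foldl pvBStep (-1, -1, none)

theorem pvFindEnd_bounds (xs : List Int) (k : Nat) : -1 ≤ pvFindEnd xs k ∧ pvFindEnd xs k < k := by
  induction k with
  | zero => simp [pvFindEnd]
  | succ m ih =>
    simp only [pvFindEnd]
    split_ifs with h
    · constructor <;> omega
    · exact ⟨ih.1, by omega⟩

theorem pvFindEnd_append (xs : List Int) (v : Int) (k : Nat) (hk : k ≤ xs.length) :
    pvFindEnd (xs ++ [v]) k = pvFindEnd xs k := by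
  induction k with
  | zero => rfl
  | succ m ih =>
    have hm : m < xs.length := by omega
    simp only [pvFindEnd, List.getD_append _ _ _ _ hm]
    rw [ih (by omega)]

theorem pvFindStart_append (xs : List Int) (v : Int) (k : Nat) (hk : k ≤ xs.length) :
    pvFindStart (xs ++ [v]) k = pvFindStart xs k := by
  induction k with
  | zero => rfl
  | succ m ih =>
    have hm : m < xs.length := by omega
    simp only [pvFindStart, List.getD_append _ _ _ _ hm]
    rw [ih (by omega)]

theorem pvState_append (xs : List Int) (v : Int) :
    pvState (xs ++ [v]) = pvBStep (pvState xs) ((xs.length : Int), v) := by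
  unfold pvState
  rw [PySem.List.enumerate_append]
  simp [PySem.List.enumerate]

theorem pvGetLast_getD (xs : List Int) (h : xs ≠ []) :
    xs.getLast? = some (xs.getD (xs.length - 1) 0) := by
  have hl : xs.length - 1 < xs.length := by
    have := List.length_pos_of_ne_nil h; omega
  rw [List.getLast?_eq_getElem?, List.getD_eq_getElem?_getD, List.getElem?_eq_getElem hl]
  rfl

-- the forward-pass invariant: state components vs A's two backward scans
theorem pvInv (xs : List Int) :
    (pvState xs).1 = pvFindEnd xs xs.length ∧
    (pvState xs).2.2 = xs.getLast? ∧
    pvFindStart xs ((pvFindEnd xs xs.length) + 1).toNat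
      = (if (pvState xs).2.1 ≤ 0 then -1 else (pvState xs).2.1 + 4) := by
  induction xs using List.reverseRecOn with
  | nil => simp [pvState, PySem.List.enumerate, pvFindEnd, pvFindStart]
  | append_singleton xs v ih =>
    obtain ⟨ihE, ihP, ihS⟩ := ih
    have hlen : (xs ++ [v]).length = xs.length + 1 := by simp
    have hgn : (xs ++ [v]).getD xs.length 0 = v := by
      rw [List.getD_eq_getElem?_getD]; simp
    have hEnd1 : pvFindEnd (xs ++ [v]) (xs.length + 1)
        = if v = -1 then (xs.length : Int) else pvFindEnd xs xs.length := by
      simp only [pvFindEnd, hgn]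
      split_ifs with h
      · rfl
      · exact pvFindEnd_append xs v xs.length le_rfl
    rw [pvState_append, hlen]
    by_cases hv : v = -1
    · subst hv
      simp only [pvBStep, if_true]
      by_cases hp : (pvState xs).2.2 ≠ some (-1)
      · -- previous element is not -1 (or list empty): the run starts here
        simp only [if_pos hp]
        refine ⟨by rw [hEnd1]; simp, by simp, ?_⟩
        rw [hEnd1, if_pos rfl]
        have ht : ((xs.length : Int) + 1).toNat = xs.length + 1 := by omega
        rw [ht]
        simp only [pvFindStart, hgn]
        rw [if_neg (by simp)]
        rw [pvFindStart_append xs (-1) xs.length le_rfl]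
        rcases Nat.eq_zero_or_pos xs.length with h0 | h0
        · rw [h0]; simp [pvFindStart]
        · -- xs ≠ [], and its last element is not -1
          have hne : xs ≠ [] := by
            intro h; rw [h] at h0; simp at h0
          have hlast : xs.getD (xs.length - 1) 0 ≠ -1 := by
            intro h
            apply hp
            rw [ihP, pvGetLast_getD xs hne, h]
          have hs : xs.length = (xs.length - 1) + 1 := by omega
          rw [hs]
          simp only [pvFindStart]
          rw [if_pos hlast]
          rw [if_neg (by omega)]
          push_cast
          omega
      · -- previous element is -1: run continues, block_start unchanged
        rw [not_not] at hp
        simp only [hp, ne_eq, not_true_eq_false, if_false]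
        refine ⟨by rw [hEnd1]; simp, by simp, ?_⟩
        have hne : xs ≠ [] := by
          intro h; subst h
          simp [pvState, PySem.List.enumerate] at hp
        have hpos : 0 < xs.length := List.length_pos_of_ne_nil hne
        have hlast : xs.getD (xs.length - 1) 0 = -1 := by
          have := pvGetLast_getD xs hne
          rw [ihP, this] at hp
          exact (Option.some_inj.mp hp.symm).symm
        have hEold : pvFindEnd xs xs.length = ((xs.length : Int) - 1) := by
          have hs : xs.length = (xs.length - 1) + 1 := by omega
          rw [hs]
          simp only [pvFindEnd]
          rw [if_pos hlast]
          push_cast; omega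
        rw [hEnd1, if_pos rfl]
        have ht : ((xs.length : Int) + 1).toNat = xs.length + 1 := by omega
        rw [ht]
        simp only [pvFindStart, hgn]
        rw [if_neg (by simp)]
        rw [pvFindStart_append xs (-1) xs.length le_rfl]
        have ht2 : ((pvFindEnd xs xs.length) + 1).toNat = xs.length := by
          rw [hEold]; omega
        rw [← ht2, ihS]
    · -- current element not -1: state only updates prev
      simp only [pvBStep, if_neg hv]
      have hb := pvFindEnd_bounds xs xs.length
      refine ⟨by rw [hEnd1, if_neg hv]; exact ihE, by simp, ?_⟩
      rw [hEnd1, if_neg hv]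
      rw [pvFindStart_append xs v _ (by omega)]
      exact ihS

-- ===== VERDICT (by name: the statement is the Claim_ definition above) =====
theorem reverse_cycle_index_start_finish_spec : Claim_equal_reverse_cycle_index_start_finish := by
  intro xs _
  unfold Spec_reverse_cycle_index_start_finish reverse_cycle_index_start_finish reverse_cycle_index_start_finish_alt
  obtain ⟨hE, _, hS⟩ := pvInv xs
  show ((if pvFindStart xs ((pvFindEnd xs xs.length) + 1).toNat = -1 then 0
          else pvFindStart xs ((pvFindEnd xs xs.length) + 1).toNat), pvFindEnd xs xs.length)
      = ((if (pvState xs).2.1 > 0 then (pvState xs).2.1 + 4 else 0), (pvState xs).1)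
  rw [hS, hE]
  by_cases hbs : (pvState xs).2.1 ≤ 0
  · rw [if_pos hbs, if_pos rfl, if_neg (by omega)]
  · rw [if_neg hbs, if_neg (by omega : ¬ (pvState xs).2.1 + 4 = -1), if_pos (by omega : (pvState xs).2.1 > 0)]
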